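-- pv_equiv track=rewrite | github.com/jjfitzge/312-Project | utility/request.py | parse_multipart_header
-- ===== SOURCE A (Python) =====
-- def parse_header(header_line):
--     header = ""
--     info = ""
--     header_found = False
--     for char in header_line:
--         if char == ":":
--             header_found = True
--         elif char != " " and header_found == True:
--             info += char
--         else:
--             if char != " ":
--                 header += char
--     return [header, info]
--
-- def parse_multipart_heading(line):
--     # TODO if needed: split up the content dispositon line to get each value
--     content = line.split(';')
--     for value in content:
--         if (value.find('name=')) != -1:
--             return value[value.find('name=')+len('name='):].replace('"', '')
--
--     return line
--
-- def parse_multipart_header(headers):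
--     header_dict = {}
--     for heading in headers:
--         if heading != '':
--             retlist = parse_header(heading)
--             if retlist[0] == 'Content-Disposition':
--                 header_dict["name"] = parse_multipart_heading(retlist[1])
--             header_dict[retlist[0]] = retlist[1]
--         else:
--             continue
--     return header_dict
-- ===== SOURCE B (Python) =====
-- def _name_of(value):
--     parts = value.split(';')
--     hit = next((p for p in parts if 'name=' in p), None)
--     if hit is None:
--         return value
--     return hit[hit.find('name=') + 5:].replace('"', '')
--
-- def parse_multipart_header(headers):
--     result = {}
--     for line in headers:
--         if line == '':
--             continue
--         cleaned = line.replace(' ', '')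
--         parts = cleaned.split(':', 1)
--         key = parts[0]
--         value = parts[1].replace(':', '') if len(parts) == 2 else ''
--         if key == 'Content-Disposition':
--             result['name'] = _name_of(value)
--         result[key] = value
--     return result
-- ===== Notes on version B (the rewrite author's own statement) =====
-- stated objective: simpler
-- what changed: Replaces the character-by-character state machine of parse_header with library string operations: strip all spaces with replace, split once on ':' for the key, drop remaining colons from the value; the name-extraction loop becomes a next()-over-generator pick of the first ';'-part containing 'name='.
import Mathlib
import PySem

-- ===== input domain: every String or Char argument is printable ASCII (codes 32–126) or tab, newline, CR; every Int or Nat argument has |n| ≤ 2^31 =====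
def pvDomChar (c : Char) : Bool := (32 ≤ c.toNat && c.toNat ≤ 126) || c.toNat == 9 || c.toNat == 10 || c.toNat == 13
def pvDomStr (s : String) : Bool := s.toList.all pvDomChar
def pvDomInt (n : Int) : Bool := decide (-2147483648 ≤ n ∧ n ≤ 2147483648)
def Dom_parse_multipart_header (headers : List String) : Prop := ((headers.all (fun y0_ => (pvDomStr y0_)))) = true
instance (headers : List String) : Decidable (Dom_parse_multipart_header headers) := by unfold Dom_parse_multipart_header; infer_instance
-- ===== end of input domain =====

-- B replaces A's character-by-character state machine with library split/replace calls (same cost, simpler decomposition); return values only, no mutation involved.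

-- ===== PORT A =====
-- parse_header's loop body, one character at a time (state = (header, info, header_found))
def pvStepA (s : List Char × List Char × Bool) (c : Char) : List Char × List Char × Bool :=
  if c == ':' then (s.1, s.2.1, true)
  else if c != ' ' && s.2.2 then (s.1, s.2.1 ++ [c], s.2.2)
  else if c != ' ' then (s.1 ++ [c], s.2.1, s.2.2)
  else s

def pvParseHeader (header_line : String) : String × String :=
  let r := header_line.toList.foldl pvStepA ([], [], false)
  (String.ofList r.1, String.ofList r.2.1)

-- parse_multipart_heading's for-loop with early return
def pvHeadingLoop (line : String) : List String → String
  | [] => line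
  | v :: rest =>
      if PySem.Str.find v "name=" != -1 then
        PySem.Str.replace (PySem.Str.slice v (some (PySem.Str.find v "name=" + 5)) none) "\"" ""
      else pvHeadingLoop line rest

def pvParseHeading (line : String) : String :=
  pvHeadingLoop line ((PySem.Str.split? line ";").getD [])

def parse_multipart_header (headers : List String) : List (String × String) :=
  (headers.foldl
    (fun (d : PySem.Dict String String) heading =>
      if heading != "" then
        let retlist := pvParseHeader heading
        let d2 := if retlist.1 == "Content-Disposition" then d.insert "name" (pvParseHeading retlist.2) else d
        d2.insert retlist.1 retlist.2
      else d)
    PySem.Dict.empty).items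

-- ===== PORT B =====
def pvNameOf (value : String) : String :=
  let parts := (PySem.Str.split? value ";").getD []
  match parts.find? (fun p => PySem.Str.isIn "name=" p) with
  | none => value
  | some hit => PySem.Str.replace (PySem.Str.slice hit (some (PySem.Str.find hit "name=" + 5)) none) "\"" ""

-- key/value of one header line: strip spaces, split once on ':', drop colons from the value
def pvKV (line : String) : String × String :=
  let cleaned := PySem.Str.replace line " " ""
  match (PySem.Str.splitMax? cleaned ":" 1).getD [] with
  | [k, rest] => (k, PySem.Str.replace rest ":" "")
  | [k] => (k, "")
  | _ => ("", "")  -- unreachable: split(sep, 1) yields 1 or 2 parts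

def parse_multipart_header_alt (headers : List String) : List (String × String) :=
  (headers.foldl
    (fun (d : PySem.Dict String String) line =>
      if line == "" then d
      else
        let kv := pvKV line
        let d2 := if kv.1 == "Content-Disposition" then d.insert "name" (pvNameOf kv.2) else d
        d2.insert kv.1 kv.2)
    PySem.Dict.empty).items

-- ===== PRECONDITION & SPEC =====
def Spec_parse_multipart_header (headers : List String) (out : List (String × String)) : Prop := out = parse_multipart_header_alt headers
instance (headers : List String) (out : List (String × String)) : Decidable (Spec_parse_multipart_header headers out) := by unfold Spec_parse_multipart_header; infer_instance

-- ===== CLAIM (what is proved, stated in full; the proofs are below) =====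
def Claim_equal_parse_multipart_header : Prop := ∀ (headers : List String), Dom_parse_multipart_header headers → Spec_parse_multipart_header headers (parse_multipart_header headers)

-- ===== LEMMAS AND PROOFS =====

-- A's loop once header_found is true: append every non-space non-colon char to info
theorem pvFoldA_true (cs : List Char) (h i : List Char) :
    cs.foldl pvStepA (h, i, true) = (h, i ++ cs.filter (fun c => c != ':' && c != ' '), true) := by
  induction cs generalizing i with
  | nil => simp
  | cons c t ih =>
      by_cases hc : c = ':'
      · subst hc; simp [pvStepA, ih]
      · by_cases hs : c = ' '
        · subst hs; simp [pvStepA, ih, hc]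
        · simp [pvStepA, ih, hc, hs, List.filter_cons]

-- A's loop from the initial state: header = spaces-stripped part before the first ':',
-- info = spaces-and-colons-stripped part after it, flag = whether a ':' occurred
theorem pvFoldA_false (cs : List Char) (h : List Char) :
    cs.foldl pvStepA (h, [], false) =
      (h ++ (cs.takeWhile (· != ':')).filter (· != ' '),
       ((cs.dropWhile (· != ':')).tail).filter (fun c => c != ':' && c != ' '),
       cs.contains ':') := by
  induction cs generalizing h with
  | nil => simp
  | cons c t ih =>
      by_cases hc : c = ':'
      · subst hc; simp [pvStepA, pvFoldA_true]
      · by_cases hs : c = ' '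
        · subst hs; simp [pvStepA, ih, hc]
        · simp [pvStepA, ih, hc, hs, Ne.symm hc, List.filter_cons]

-- replace(s, c, '') is filter
theorem pvReplaceGo (d : Char) (fuel : Nat) (l acc : List Char) (hf : l.length ≤ fuel) :
    PySem.Chars.replace.go [d] [] fuel l acc = acc.reverse ++ l.filter (· != d) := by
  induction fuel generalizing l acc with
  | zero =>
      have hl : l = [] := List.eq_nil_of_length_eq_zero (Nat.le_zero.mp hf)
      subst hl
      rw [PySem.Chars.replace.go]
      simp
  | succ n ih =>
      cases l with
      | nil => rw [PySem.Chars.replace.go]; simp; omega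
      | cons c t =>
          rw [PySem.Chars.replace.go]
          have ht : t.length ≤ n := by simpa using hf
          by_cases hdc : d = c
          · subst hdc
            simp [List.isPrefixOf, ih t acc ht, List.filter_cons]
          · simp [List.isPrefixOf, hdc, Ne.symm hdc, ih t (c :: acc) ht, List.filter_cons]

theorem pvReplace_filter (d : Char) (cs : List Char) :
    PySem.Chars.replace cs [d] [] = cs.filter (· != d) := by
  rw [PySem.Chars.replace]
  simp only [List.isEmpty_cons, Bool.false_eq_true, if_false]
  simpa using pvReplaceGo d cs.length cs [] le_rfl

-- split(s, c, 1): at most one split, at the first occurrence of c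
theorem pvSplitGo0 (d : Char) (fuel : Nat) (l cur : List Char) (acc : List (List Char)) :
    PySem.Chars.splitOnMax.go [d] fuel 0 l cur acc = ((cur.reverse ++ l) :: acc).reverse := by
  cases fuel with
  | zero => rw [PySem.Chars.splitOnMax.go]
  | succ n =>
      cases l with
      | nil => rw [PySem.Chars.splitOnMax.go]; simp; omega
      | cons c t => rw [PySem.Chars.splitOnMax.go]; simp

theorem pvSplitGo1 (d : Char) (fuel : Nat) (l cur : List Char) (acc : List (List Char)) (hf : l.length ≤ fuel) :
    PySem.Chars.splitOnMax.go [d] fuel 1 l cur acc =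
      acc.reverse ++ (if l.contains d then
        [cur.reverse ++ l.takeWhile (· != d), (l.dropWhile (· != d)).tail]
      else [cur.reverse ++ l]) := by
  induction fuel generalizing l cur acc with
  | zero =>
      have hl : l = [] := List.eq_nil_of_length_eq_zero (Nat.le_zero.mp hf)
      subst hl
      rw [PySem.Chars.splitOnMax.go]
      simp
  | succ n ih =>
      cases l with
      | nil => rw [PySem.Chars.splitOnMax.go]; simp; omega
      | cons c t =>
          rw [PySem.Chars.splitOnMax.go]
          have ht : t.length ≤ n := by simpa using hf
          by_cases hdc : d = c
          · subst hdc
            simp [List.isPrefixOf, pvSplitGo0, List.takeWhile_cons, List.dropWhile_cons,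
                  List.contains_cons]
          · simp [List.isPrefixOf, hdc, Ne.symm hdc, ih t (c :: cur) acc ht,
                  List.takeWhile_cons, List.dropWhile_cons, List.contains_cons]

theorem pvSplitMax1 (d : Char) (cs : List Char) :
    PySem.Chars.splitOnMax cs [d] 1 =
      (if cs.contains d then [cs.takeWhile (· != d), (cs.dropWhile (· != d)).tail] else [cs]) := by
  rw [PySem.Chars.splitOnMax]
  have h1 : ¬ ((1 : Int) < 0) := by norm_num
  rw [if_neg h1]
  have h2 : (1 : Int).toNat = 1 := rfl
  rw [h2, pvSplitGo1 d (cs.length + 1) cs [] [] (by omega)]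
  simp

-- filtering out spaces commutes with cutting at the first colon
theorem pvTakeWhile_filter (cs : List Char) :
    (cs.filter (· != ' ')).takeWhile (· != ':') = (cs.takeWhile (· != ':')).filter (· != ' ') := by
  induction cs with
  | nil => simp
  | cons c t ih =>
      by_cases hc : c = ':'
      · subst hc; simp [List.filter_cons, List.takeWhile_cons]
      · by_cases hs : c = ' '
        · subst hs; simp [ih, List.filter_cons, List.takeWhile_cons]
        · simp [hc, hs, ih, List.filter_cons, List.takeWhile_cons]

theorem pvTailDrop_filter (cs : List Char) :
    ((cs.filter (· != ' ')).dropWhile (· != ':')).tail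
      = ((cs.dropWhile (· != ':')).tail).filter (· != ' ') := by
  induction cs with
  | nil => simp
  | cons c t ih =>
      by_cases hc : c = ':'
      · subst hc; simp [List.filter_cons, List.dropWhile_cons]
      · by_cases hs : c = ' '
        · subst hs; simp [ih, List.filter_cons, List.dropWhile_cons]
        · simp [hc, hs, ih, List.filter_cons, List.dropWhile_cons]

-- 'name=' in p, as A's find-based test
theorem pvFindBool (v : String) :
    (PySem.Str.find v "name=" != -1) = PySem.Str.isIn "name=" v := by
  by_cases h : ("name=" : String).toList <:+: v.toList
  · have h1 : PySem.Str.find v "name=" ≠ -1 := (PySem.Str.find_ne_neg_one_iff v "name=").mpr h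
    have h2 : PySem.Str.isIn "name=" v = true := (PySem.Str.isIn_iff_infix "name=" v).mpr h
    rw [h2]
    exact bne_iff_ne.mpr h1
  · have h1 : PySem.Str.find v "name=" = -1 :=
      not_not.mp (fun hh => h ((PySem.Str.find_ne_neg_one_iff v "name=").mp hh))
    have h2 : PySem.Str.isIn "name=" v = false :=
      eq_false_of_ne_true (fun hh => h ((PySem.Str.isIn_iff_infix "name=" v).mp hh))
    rw [h1, h2]
    decide

-- A's early-return loop over the ';'-parts is B's find?
theorem pvHeadingAux (line : String) (parts : List String) :
    pvHeadingLoop line parts =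
      (match parts.find? (fun p => PySem.Str.isIn "name=" p) with
       | none => line
       | some hit => PySem.Str.replace (PySem.Str.slice hit (some (PySem.Str.find hit "name=" + 5)) none) "\"" "") := by
  induction parts with
  | nil => rfl
  | cons v rest ih =>
      rw [pvHeadingLoop, pvFindBool]
      by_cases hv : PySem.Str.isIn "name=" v = true
      · rw [if_pos hv, List.find?_cons_of_pos hv]
      · rw [if_neg hv, List.find?_cons_of_neg (by simpa using hv)]
        exact ih

theorem pvHeading_eq (v : String) : pvParseHeading v = pvNameOf v := by
  simp only [pvParseHeading, pvNameOf]
  exact pvHeadingAux v _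

-- the two per-line parses agree
theorem pvKV_eq (line : String) : pvParseHeader line = pvKV line := by
  have hclean : (PySem.Str.replace line " " "").toList = line.toList.filter (· != ' ') := by
    rw [PySem.Str.toList_replace, show (" " : String).toList = [' '] from rfl,
       show ("" : String).toList = [] from rfl, pvReplace_filter]
  have hA : pvParseHeader line
      = (String.ofList ((line.toList.takeWhile (· != ':')).filter (· != ' ')),
         String.ofList (((line.toList.dropWhile (· != ':')).tail).filter (fun c => c != ':' && c != ' '))) := by
    show (String.ofList (line.toList.foldl pvStepA ([], [], false)).1,
          String.ofList (line.toList.foldl pvStepA ([], [], false)).2.1) = _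
    rw [pvFoldA_false]
    simp
  have hsm := PySem.Str.splitMax?_map (PySem.Str.replace line " " "") ":" 1
  rw [show (":" : String).toList = [':'] from rfl, hclean,
      show PySem.Chars.splitMax? (line.toList.filter (· != ' ')) [':'] 1
         = some (PySem.Chars.splitOnMax (line.toList.filter (· != ' ')) [':'] 1) from by
        rw [PySem.Chars.splitMax?]; rfl,
      pvSplitMax1] at hsm
  by_cases hc : (line.toList.filter (· != ' ')).contains ':'
  · rw [if_pos hc] at hsm
    cases hsp : PySem.Str.splitMax? (PySem.Str.replace line " " "") ":" 1 with
    | none => rw [hsp] at hsm; simp at hsm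
    | some ps =>
        rw [hsp] at hsm
        cases ps with
        | nil => simp at hsm
        | cons p1 ps' =>
            cases ps' with
            | nil => simp at hsm
            | cons p2 ps'' =>
                cases ps'' with
                | cons p3 t => simp at hsm
                | nil =>
                    simp only [Option.map_some, Option.some.injEq, List.map_cons, List.map_nil,
                               List.cons.injEq, and_true] at hsm
                    obtain ⟨hp1, hp2⟩ := hsm
                    have hB : pvKV line = (p1, PySem.Str.replace p2 ":" "") := by
                      simp only [pvKV, hsp, Option.getD_some]
                    rw [hA, hB]
                    simp only [Prod.mk.injEq]
                    refine ⟨?_, ?_⟩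
                    · apply String.toList_inj.mp
                      rw [String.toList_ofList, hp1, pvTakeWhile_filter]
                    · apply String.toList_inj.mp
                      rw [String.toList_ofList, PySem.Str.toList_replace, hp2,
                          show (":" : String).toList = [':'] from rfl,
                          show ("" : String).toList = [] from rfl,
                          pvReplace_filter, pvTailDrop_filter, List.filter_filter]
  · rw [if_neg hc] at hsm
    cases hsp : PySem.Str.splitMax? (PySem.Str.replace line " " "") ":" 1 with
    | none => rw [hsp] at hsm; simp at hsm
    | some ps =>
        rw [hsp] at hsm
        cases ps with
        | nil => simp at hsm
        | cons p1 ps' =>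
            cases ps' with
            | cons p2 ps'' => simp at hsm
            | nil =>
                simp only [Option.map_some, Option.some.injEq, List.map_cons, List.map_nil,
                           List.cons.injEq, and_true] at hsm
                have hnc : ∀ x ∈ line.toList.filter (· != ' '), (x != ':') = true := by
                  intro x hx
                  rcases eq_or_ne x ':' with rfl | hne
                  · exact absurd (List.contains_iff_mem.mpr hx) hc
                  · simpa using hne
                have hB : pvKV line = (p1, "") := by
                  simp only [pvKV, hsp, Option.getD_some]
                rw [hA, hB]
                simp only [Prod.mk.injEq]
                refine ⟨?_, ?_⟩
                · apply String.toList_inj.mp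
                  rw [String.toList_ofList, hsm, ← pvTakeWhile_filter,
                      List.takeWhile_eq_self_iff.mpr hnc]
                · apply String.toList_inj.mp
                  have hdw : (line.toList.filter (· != ' ')).dropWhile (· != ':') = [] :=
                    List.dropWhile_eq_nil_iff.mpr hnc
                  have htd := pvTailDrop_filter line.toList
                  rw [hdw] at htd
                  have htd' : ((line.toList.dropWhile (· != ':')).tail).filter (· != ' ') = [] :=
                    htd.symm
                  have hY : ((line.toList.dropWhile (· != ':')).tail).filter (fun c => c != ':' && c != ' ')
                      = (((line.toList.dropWhile (· != ':')).tail).filter (· != ' ')).filter (· != ':') := by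
                    rw [List.filter_filter]
                  rw [String.toList_ofList, hY, htd']
                  simp

-- ===== VERDICT (by name: the statement is the Claim_ definition above) =====
theorem parse_multipart_header_spec : Claim_equal_parse_multipart_header := by
  intro headers _
  unfold Spec_parse_multipart_header parse_multipart_header parse_multipart_header_alt
  congr 1
  apply List.foldl_ext
  intro d line _
  by_cases he : line = ""
  · simp [he]
  · simp only [pvKV_eq, pvHeading_eq]
    simp [he]
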